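-- pv_equiv track=rewrite | github.com/amar528/amar528.github.io | hacker-rank/wisetech_practice_3.py | getMaxSubsequenceLen
-- ===== SOURCE A (Python) =====
-- def getMaxSubsequenceLen(arr):
--     arr_sorted = sorted(arr)
--
--     result = []
--
--     for i, v in enumerate(arr_sorted):
--         left = arr_sorted[:i]
--         right = arr_sorted[i:]
--         if len(left) %2 and len(right) % 2:
--             result.append(v)
--
--
--     return result
-- ===== SOURCE B (Python) =====
-- def getMaxSubsequenceLen(arr):
--     # both split halves have odd length iff the total length is even and the
--     # index is odd, so: sort once and take every second element.
--     if len(arr) % 2: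
--         return []
--     out = []
--     it = iter(sorted(arr))
--     for _first, second in zip(it, it):
--         out.append(second)
--     return out
-- ===== Notes on version B (the rewrite author's own statement) =====
-- stated objective: faster
-- what changed: A builds both slices of the sorted list at every index and tests their lengths (quadratic); B notes the condition holds exactly when the total length is even and the index is odd, so it sorts once and collects every second element in one linear pass over an iterator.
import Mathlib
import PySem

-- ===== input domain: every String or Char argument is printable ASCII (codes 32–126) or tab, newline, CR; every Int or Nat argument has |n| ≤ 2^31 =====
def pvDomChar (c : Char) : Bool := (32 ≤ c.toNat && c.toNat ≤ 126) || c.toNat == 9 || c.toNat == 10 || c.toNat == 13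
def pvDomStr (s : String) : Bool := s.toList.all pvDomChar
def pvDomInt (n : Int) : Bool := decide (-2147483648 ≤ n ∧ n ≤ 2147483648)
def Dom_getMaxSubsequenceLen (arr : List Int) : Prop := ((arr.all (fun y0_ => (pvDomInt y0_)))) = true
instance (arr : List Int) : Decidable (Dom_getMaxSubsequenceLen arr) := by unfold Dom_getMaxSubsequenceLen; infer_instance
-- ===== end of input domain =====

-- B replaces A's per-index slice building (quadratic) with one sorted pass taking every second element; objective: faster.

-- ===== PORT A =====
-- literal transliteration of A: sort, then for each (i, v) in enumerate build both
-- slices and append v when both slice lengths are odd (Python int truthiness = ≠ 0).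
def getMaxSubsequenceLen (arr : List Int) : List Int :=
  let arr_sorted := PySem.List.sorted arr (fun x => x) false
  (PySem.List.enumerate arr_sorted).foldl
    (fun result iv =>
      let left := PySem.List.slice arr_sorted none (some iv.1)
      let right := PySem.List.slice arr_sorted (some iv.1) none
      if left.length % 2 ≠ 0 ∧ right.length % 2 ≠ 0 then result ++ [iv.2] else result)
    []

-- ===== PORT B =====
-- Source B's 'for _first, second in zip(it, it)': consume the sorted list two at a
-- time, keeping the second element of each pair.
def pvPairsSnd : List Int → List Int
  | _ :: b :: rest => b :: pvPairsSnd rest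
  | _ => []

def getMaxSubsequenceLen_alt (arr : List Int) : List Int :=
  if arr.length % 2 ≠ 0 then []
  else pvPairsSnd (PySem.List.sorted arr (fun x => x) false)

-- ===== PRECONDITION & SPEC =====
def Spec_getMaxSubsequenceLen (arr : List Int) (out : List Int) : Prop := out = getMaxSubsequenceLen_alt arr
instance (arr : List Int) (out : List Int) : Decidable (Spec_getMaxSubsequenceLen arr out) := by unfold Spec_getMaxSubsequenceLen; infer_instance

-- ===== CLAIM (what is proved, stated in full; the proofs are below) =====
def Claim_equal_getMaxSubsequenceLen : Prop := ∀ (arr : List Int), Dom_getMaxSubsequenceLen arr → Spec_getMaxSubsequenceLen arr (getMaxSubsequenceLen arr)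

-- ===== LEMMAS AND PROOFS =====

-- index bounds of the members of `enumerate`
theorem pv_mem_enumerate_bounds {α : Type} (l : List α) (k i : Int) (v : α)
    (h : (i, v) ∈ PySem.List.enumerate l k) : k ≤ i ∧ i < k + l.length := by
  induction l generalizing k with
  | nil => simp [PySem.List.enumerate_nil] at h
  | cons x xs ih =>
      rw [PySem.List.enumerate_cons] at h
      rcases List.mem_cons.mp h with h1 | h2
      · cases h1; simp
      · have := ih (k + 1) h2
        simp only [List.length_cons]
        omega

-- keeping the odd indices, starting from an even counter, is the pair recursion
theorem pv_filter_odd_enumerate (l : List Int) (k : Int) (hk : k % 2 = 0) :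
    ((PySem.List.enumerate l k).filter (fun iv => decide (iv.1 % 2 = 1))).map Prod.snd
      = pvPairsSnd l := by
  induction l using pvPairsSnd.induct generalizing k with
  | case1 a b rest ih =>
      rw [PySem.List.enumerate_cons, PySem.List.enumerate_cons]
      have h1 : ¬ (k % 2 = 1) := by omega
      have h2 : (k + 1) % 2 = 1 := by omega
      simp only [List.filter_cons, h1, h2, decide_true, decide_false, if_true, if_false,
        List.map_cons, Bool.false_eq_true]
      rw [show k + 1 + 1 = k + 2 by ring, ih (k + 2) (by omega), pvPairsSnd]
  | case2 l hflat =>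
      cases l with
      | nil => simp [PySem.List.enumerate_nil, pvPairsSnd]
      | cons a t =>
          cases t with
          | nil =>
              rw [PySem.List.enumerate_cons, PySem.List.enumerate_nil]
              have h1 : ¬ (k % 2 = 1) := by omega
              simp [h1, pvPairsSnd]
          | cons b r => exact absurd rfl (fun h => hflat a b r h)

theorem pv_main (arr : List Int) :
    getMaxSubsequenceLen arr = getMaxSubsequenceLen_alt arr := by
  unfold getMaxSubsequenceLen getMaxSubsequenceLen_alt
  set s := PySem.List.sorted arr (fun x => x) false with hs
  have hlen : s.length = arr.length := PySem.List.length_sorted arr (fun x => x) false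
  -- the accumulating loop is filter + map (PySem.List.foldl_append_if)
  have hfold :
      (PySem.List.enumerate s).foldl
        (fun result iv =>
          let left := PySem.List.slice s none (some iv.1)
          let right := PySem.List.slice s (some iv.1) none
          if left.length % 2 ≠ 0 ∧ right.length % 2 ≠ 0 then result ++ [iv.2] else result)
        []
      = ((PySem.List.enumerate s).filter
          (fun iv => decide ((PySem.List.slice s none (some iv.1)).length % 2 ≠ 0 ∧
                             (PySem.List.slice s (some iv.1) none).length % 2 ≠ 0))).map
          Prod.snd := by
    have hfun :
        (fun (result : List Int) (iv : Int × Int) =>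
          let left := PySem.List.slice s none (some iv.1)
          let right := PySem.List.slice s (some iv.1) none
          if left.length % 2 ≠ 0 ∧ right.length % 2 ≠ 0 then result ++ [iv.2] else result)
        = (fun result iv =>
            if (fun (iv : Int × Int) =>
                  decide ((PySem.List.slice s none (some iv.1)).length % 2 ≠ 0 ∧
                          (PySem.List.slice s (some iv.1) none).length % 2 ≠ 0)) iv = true
            then result ++ [iv.2] else result) := by
      funext result iv
      exact if_congr (by simp) rfl rfl
    rw [hfun, PySem.List.foldl_append_if, List.nil_append]
  rw [hfold]
  by_cases hpar : arr.length % 2 ≠ 0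
  · -- odd total length: the condition never holds
    rw [if_pos hpar, List.map_eq_nil_iff, List.filter_eq_nil_iff]
    rintro ⟨i, v⟩ hmem
    have hb := pv_mem_enumerate_bounds s 0 i v hmem
    have h0 : 0 ≤ i := by omega
    rw [PySem.List.slice_to s h0, PySem.List.slice_from s h0]
    have hi : i.toNat ≤ s.length := by omega
    simp only [List.length_take, List.length_drop, decide_eq_true_eq, not_and_or]
    omega
  · -- even total length: the condition is exactly 'index odd'
    rw [if_neg hpar]
    rw [List.filter_congr (l := PySem.List.enumerate s)
      (q := fun iv => decide (iv.1 % 2 = 1)) ?_]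
    · exact pv_filter_odd_enumerate s 0 rfl
    · rintro ⟨i, v⟩ hmem
      have hb := pv_mem_enumerate_bounds s 0 i v hmem
      have h0 : 0 ≤ i := by omega
      simp only []
      rw [PySem.List.slice_to s h0, PySem.List.slice_from s h0]
      have hi : i.toNat ≤ s.length := by omega
      simp only [List.length_take, List.length_drop, decide_eq_decide]
      omega

-- ===== VERDICT (by name: the statement is the Claim_ definition above) =====
theorem getMaxSubsequenceLen_spec : Claim_equal_getMaxSubsequenceLen := by
  intro arr _
  exact pv_main arr
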